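-- pv_equiv track=rewrite | github.com/Avicii4/LeetCode | Python/exam/Dian1.py | binary_fill
-- ===== SOURCE A (Python) =====
-- def binary_fill(n: int) -> int:
--     bn=list(bin(n)[2:])
--     flag = False
--     for i in range(len(bn)-1,-1,-1):
--         if flag:
--             bn[i]="1"
--         elif bn[i]=="1":
--             flag=True
--         else:
--             continue
--     return int("".join(bn),2)
-- ===== SOURCE B (Python) =====
-- def binary_fill(n: int) -> int:
--     s = bin(n)[2:]
--     idx = s.rfind('1')
--     return int('1' * (idx + 1) + s[idx + 1:], 2)
-- ===== Notes on version B (the rewrite author's own statement) =====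
-- stated objective: simpler
-- what changed: Replaces the reverse index loop with flag and in-place list mutation by a direct construction: rfind the lowest set bit in the bin() string and concatenate a '1'-prefix with the untouched suffix.
import Mathlib
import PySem

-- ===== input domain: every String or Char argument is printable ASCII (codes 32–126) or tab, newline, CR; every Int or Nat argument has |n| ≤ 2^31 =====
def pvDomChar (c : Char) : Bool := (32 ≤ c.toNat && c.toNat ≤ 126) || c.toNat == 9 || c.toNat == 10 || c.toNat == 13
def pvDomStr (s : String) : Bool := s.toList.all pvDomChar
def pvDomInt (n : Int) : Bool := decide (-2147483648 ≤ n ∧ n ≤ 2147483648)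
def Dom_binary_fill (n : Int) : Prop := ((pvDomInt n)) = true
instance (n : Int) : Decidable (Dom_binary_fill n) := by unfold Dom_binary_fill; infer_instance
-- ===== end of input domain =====

-- B replaces A's reverse index loop (flag + in-place mutation) by rfind-ing the lowest set bit
-- in the bin() string and concatenating a '1'-prefix with the untouched suffix ("simpler").


-- ===== PORT A =====
-- shared helper (both Pythons compute bin(n)[2:]): binary digits of a positive Nat, MSB first
def natBits : Nat → List Char
  | 0 => []
  | m + 1 => natBits ((m + 1) / 2) ++ [if (m + 1) % 2 == 1 then '1' else '0']
decreasing_by exact Nat.div_lt_self (Nat.succ_pos m) (by omega)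

-- shared helper: bin(n)[2:] as a list of chars.
-- Python: bin(0)='0b0' → "0"; bin(-m)='-0b…' → '[2:]' keeps the 'b' ('b'::bits), exact.
def binDigits (n : Int) : List Char :=
  if n < 0 then 'b' :: natBits n.natAbs
  else if n = 0 then ['0']
  else natBits n.natAbs

-- shared helper: int(s, 2). Exact on strings of '0'/'1' chars, which is all either
-- port ever feeds it (A overwrites the 'b' with '1'; B's '1'-prefix covers it).
def parseBin (l : List Char) : Int :=
  l.foldl (fun acc c => 2 * acc + (if c == '1' then 1 else 0)) 0

-- A's loop 'for i in range(len(bn)-1,-1,-1)' reads and writes only index i, so it is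
-- ported as structural recursion over the reversed list with the same flag state.
def fillRev : List Char → Bool → List Char
  | [], _ => []
  | c :: t, flag =>
    if flag then '1' :: fillRev t true
    else if c == '1' then c :: fillRev t true
    else c :: fillRev t flag

def binary_fill (n : Int) : Int :=
  let bn := binDigits n
  parseBin (fillRev bn.reverse false).reverse

-- ===== PORT B =====
-- s.rfind(c): index of the last occurrence, -1 if absent
def pyRfind (l : List Char) (c : Char) : Int :=
  match l.reverse.findIdx? (· == c) with
  | some j => (l.length : Int) - 1 - (j : Int)
  | none => -1

def binary_fill_alt (n : Int) : Int :=
  let s := binDigits n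
  let idx := pyRfind s '1'
  parseBin (List.replicate (idx + 1).toNat '1' ++ s.drop (idx + 1).toNat)

-- ===== PRECONDITION & SPEC =====
def Spec_binary_fill (n : Int) (out : Int) : Prop := out = binary_fill_alt n
instance (n : Int) (out : Int) : Decidable (Spec_binary_fill n out) := by unfold Spec_binary_fill; infer_instance

-- ===== CLAIM (what is proved, stated in full; the proofs are below) =====
def Claim_equal_binary_fill : Prop := ∀ (n : Int), Dom_binary_fill n → Spec_binary_fill n (binary_fill n)

-- ===== LEMMAS AND PROOFS =====
theorem fillRev_true (t : List Char) : fillRev t true = List.replicate t.length '1' := by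
  induction t with
  | nil => rfl
  | cons c t ih => simp [fillRev, ih, List.replicate]

-- the index-k that both sides agree on, stated on the reversed list r
def kOf (r : List Char) : Nat :=
  match r.findIdx? (· == '1') with
  | some j => r.length - j
  | none => 0

theorem fillRev_main (r : List Char) :
    (fillRev r false).reverse = List.replicate (kOf r) '1' ++ r.reverse.drop (kOf r) := by
  induction r with
  | nil => rfl
  | cons c t ih =>
    by_cases hc : c = '1'
    · subst hc
      simp [fillRev, kOf, List.findIdx?_cons, fillRev_true, List.replicate_succ']
    · have hcb : (c == '1') = false := by simp [hc]
      cases hfi : t.findIdx? (· == '1') with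
      | none =>
        have hk : kOf (c :: t) = 0 := by simp [kOf, List.findIdx?_cons, hcb, hfi]
        have hkt : kOf t = 0 := by simp [kOf, hfi]
        rw [hk]
        simp only [fillRev, hcb, if_neg (by simp : ¬(false = true))]
        rw [List.reverse_cons, ih, hkt]
        simp
      | some j =>
        have hj : j < t.length := (List.findIdx?_eq_some_iff_findIdx_eq.mp hfi).1
        have hk : kOf (c :: t) = t.length - j := by
          simp [kOf, List.findIdx?_cons, hcb, hfi]
        have hkt : kOf t = t.length - j := by simp [kOf, hfi]
        rw [hk]
        simp only [fillRev, hcb, if_neg (by simp : ¬(false = true))]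
        rw [List.reverse_cons, ih, hkt]
        rw [List.reverse_cons, List.drop_append_of_le_length (by simp)]
        simp [List.append_assoc]

theorem kOf_eq_toNat (l : List Char) : (pyRfind l '1' + 1).toNat = kOf l.reverse := by
  unfold pyRfind kOf
  cases hfi : l.reverse.findIdx? (· == '1') with
  | none => simp
  | some j =>
    have hj : j < l.reverse.length := (List.findIdx?_eq_some_iff_findIdx_eq.mp hfi).1
    simp at hj
    simp; omega

-- ===== VERDICT (by name: the statement is the Claim_ definition above) =====
theorem binary_fill_spec : Claim_equal_binary_fill := by
  intro n _
  unfold Spec_binary_fill binary_fill binary_fill_alt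
  dsimp only
  have h := fillRev_main (binDigits n).reverse
  rw [List.reverse_reverse] at h
  rw [h, kOf_eq_toNat]
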